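-- pv_equiv track=rewrite | github.com/hypercube999/algorithms | main.py | _remove_hamming_bits
-- ===== SOURCE A (Python) =====
-- def _remove_hamming_bits(input_array):
--     output_array = input_array.copy()
--     i = 0
--     bits_positions = []
--     while 2 ** i < len(output_array):
--         bits_positions.insert(0, 2 ** i - 1)
--         i += 1
--     for bits_pos in bits_positions:
--         del output_array[bits_pos]
--     return output_array
-- ===== SOURCE B (Python) =====
-- def _remove_hamming_bits(input_array):
--     n = len(input_array)
--     out = []
--     next_pow = 1
--     for i, x in enumerate(input_array):
--         if i + 1 == next_pow:
--             next_pow *= 2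
--             if i + 1 < n:
--                 continue
--         out.append(x)
--     return out
-- ===== Notes on version B (the rewrite author's own statement) =====
-- stated objective: simpler
-- what changed: A enumerates powers of two into a positions list and then deletes those indices from a copy back-to-front; B is a single pass that keeps each element unless its index is one below a running power-of-two counter (and not the last index), building the output directly.
import Mathlib
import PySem

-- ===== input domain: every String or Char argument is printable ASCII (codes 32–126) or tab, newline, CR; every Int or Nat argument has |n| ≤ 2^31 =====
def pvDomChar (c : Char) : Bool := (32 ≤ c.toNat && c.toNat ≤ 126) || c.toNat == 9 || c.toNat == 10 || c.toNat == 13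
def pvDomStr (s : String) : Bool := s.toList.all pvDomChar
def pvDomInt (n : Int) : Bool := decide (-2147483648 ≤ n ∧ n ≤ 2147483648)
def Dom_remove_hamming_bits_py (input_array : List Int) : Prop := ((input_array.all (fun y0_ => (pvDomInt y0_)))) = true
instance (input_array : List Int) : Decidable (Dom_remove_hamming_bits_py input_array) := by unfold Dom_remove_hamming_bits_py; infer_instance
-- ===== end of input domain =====

-- B replaces A's build-positions-then-delete-in-reverse with a single pass that keeps
-- elements unless the index is one below the running power-of-two counter (objective: simpler).

-- ===== PORT A =====
-- the while loop: while 2**i < n: bits_positions.insert(0, 2**i - 1); i += 1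
-- (positions 2**i - 1 are non-negative Python ints, represented as Nat)
def pvBuildPos (n : Nat) (i : Nat) (acc : List Nat) : List Nat :=
  if 2 ^ i < n then pvBuildPos n (i + 1) ((2 ^ i - 1) :: acc) else acc
termination_by n - i
decreasing_by
  have := Nat.lt_two_pow_self (n := i)
  omega

def remove_hamming_bits_py (input_array : List Int) : List Int :=
  let output_array := input_array
  let bits_positions := pvBuildPos output_array.length 0 []
  -- del output_array[bits_pos]: every position is in range here, so `del` = List.eraseIdx
  bits_positions.foldl (fun l p => l.eraseIdx p) output_array

-- ===== PORT B =====
def remove_hamming_bits_py_alt (input_array : List Int) : List Int :=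
  let n : Int := input_array.length
  (List.foldl
    (fun (st : Int × List Int) (ix : Int × Int) =>
      if ix.1 + 1 == st.1 then
        (st.1 * 2, if ix.1 + 1 < n then st.2 else st.2 ++ [ix.2])
      else
        (st.1, st.2 ++ [ix.2]))
    (1, []) (PySem.List.enumerate input_array 0)).2

-- ===== PRECONDITION & SPEC =====
def Spec_remove_hamming_bits_py (input_array : List Int) (out : List Int) : Prop := out = remove_hamming_bits_py_alt input_array
instance (input_array : List Int) (out : List Int) : Decidable (Spec_remove_hamming_bits_py input_array out) := by unfold Spec_remove_hamming_bits_py; infer_instance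

-- ===== CLAIM (what is proved, stated in full; the proofs are below) =====
def Claim_equal_remove_hamming_bits_py : Prop := ∀ (input_array : List Int), Dom_remove_hamming_bits_py input_array → Spec_remove_hamming_bits_py input_array (remove_hamming_bits_py input_array)

-- ===== LEMMAS AND PROOFS =====

-- the positions list A builds, written with the accumulator unfolded
def pvPosList (n : Nat) (i : Nat) : List Nat :=
  if 2 ^ i < n then pvPosList n (i + 1) ++ [2 ^ i - 1] else []
termination_by n - i
decreasing_by
  have := Nat.lt_two_pow_self (n := i)
  omega

theorem pvBuildPos_eq (n i : Nat) (acc : List Nat) :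
    pvBuildPos n i acc = pvPosList n i ++ acc := by
  fun_induction pvBuildPos n i acc with
  | case1 i acc h ih =>
    rw [pvPosList, if_pos h, ih, List.append_assoc]
    rfl
  | case2 i acc h =>
    rw [pvPosList, if_neg h]
    rfl

theorem pvPosList_ge (n i : Nat) : ∀ q ∈ pvPosList n i, 2 ^ i - 1 ≤ q := by
  fun_induction pvPosList n i with
  | case1 i h ih =>
    intro q hq
    rcases List.mem_append.1 hq with h1 | h1
    · have := ih q h1
      have : 2 ^ i ≤ 2 ^ (i + 1) := Nat.pow_le_pow_right (by norm_num) (by omega)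
      omega
    · simp at h1; omega
  | case2 i h => simp

theorem pvPosList_pairwise (n i : Nat) : (pvPosList n i).Pairwise (· > ·) := by
  fun_induction pvPosList n i with
  | case1 i h ih =>
    refine List.pairwise_append.2 ⟨ih, List.pairwise_singleton _ _, ?_⟩
    intro a ha b hb
    simp at hb
    have h1 := pvPosList_ge n (i + 1) a ha
    have h2 : 2 ^ i < 2 ^ (i + 1) := Nat.pow_lt_pow_right (by norm_num) (by omega)
    have h3 : 1 ≤ 2 ^ i := Nat.one_le_two_pow
    omega
  | case2 i h => simp

theorem pvPosList_mem (n i : Nat) (q : Nat) :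
    q ∈ pvPosList n i ↔ ∃ j, i ≤ j ∧ 2 ^ j < n ∧ q = 2 ^ j - 1 := by
  fun_induction pvPosList n i with
  | case1 i h ih =>
    rw [List.mem_append, ih]
    constructor
    · rintro (⟨j, hj1, hj2, hj3⟩ | h1)
      · exact ⟨j, by omega, hj2, hj3⟩
      · simp at h1; exact ⟨i, le_rfl, h, h1⟩
    · rintro ⟨j, hj1, hj2, hj3⟩
      rcases Nat.eq_or_lt_of_le hj1 with rfl | hlt
      · right; simpa using hj3
      · left; exact ⟨j, by omega, hj2, hj3⟩
  | case2 i h =>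
    simp only [List.not_mem_nil, false_iff]
    rintro ⟨j, hj1, hj2, rfl⟩
    have : 2 ^ i ≤ 2 ^ j := Nat.pow_le_pow_right (by norm_num) hj1
    omega

-- keep the elements of `t` (whose first element has index `i`) whose index is not in S
def pvKeep (S : List Nat) : Nat → List Int → List Int
  | _, [] => []
  | i, x :: t => if i ∈ S then pvKeep S (i + 1) t else x :: pvKeep S (i + 1) t

theorem pvKeep_all_lt (S : List Nat) (t : List Int) :
    ∀ i, (∀ q ∈ S, q < i) → pvKeep S i t = t := by
  induction t with
  | nil => intro i _; rfl
  | cons x r ih =>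
    intro i h
    have : i ∉ S := fun hm => by have := h i hm; omega
    rw [pvKeep, if_neg this, ih (i + 1) (fun q hq => by have := h q hq; omega)]

theorem pvKeep_eraseIdx (S : List Nat) :
    ∀ (t : List Int) (i j : Nat), (∀ q ∈ S, q < i + j) →
      pvKeep S i (t.eraseIdx j) = pvKeep ((i + j) :: S) i t := by
  intro t
  induction t with
  | nil => intro i j _; simp [List.eraseIdx, pvKeep]
  | cons x r ih =>
    intro i j h
    cases j with
    | zero =>
      simp only [List.eraseIdx]
      have h1 : i ∈ ((i + 0) :: S) := by simp
      rw [pvKeep, if_pos h1]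
      rw [pvKeep_all_lt S r i (fun q hq => by have := h q hq; omega)]
      rw [pvKeep_all_lt ((i + 0) :: S) r (i + 1)
        (fun q hq => by rcases List.mem_cons.1 hq with rfl | hq' <;> [omega; (have := h q hq'; omega)])]
    | succ j' =>
      simp only [List.eraseIdx]
      have hne : i ∈ ((i + (j' + 1)) :: S) ↔ i ∈ S := by
        constructor
        · intro hm; rcases List.mem_cons.1 hm with h1 | h1; omega; exact h1
        · intro hm; exact List.mem_cons_of_mem _ hm
      have hrec : pvKeep S (i + 1) (r.eraseIdx j') = pvKeep (((i + 1) + j') :: S) (i + 1) r :=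
        ih (i + 1) j' (fun q hq => by have := h q hq; omega)
      have harith : (i + 1) + j' = i + (j' + 1) := by omega
      rw [pvKeep, pvKeep]
      by_cases hm : i ∈ S
      · rw [if_pos hm, if_pos (hne.2 hm), hrec, harith]
      · rw [if_neg hm, if_neg (fun hc => hm (hne.1 hc)), hrec, harith]

theorem pvFoldl_eraseIdx (ps : List Nat) :
    ∀ xs : List Int, ps.Pairwise (· > ·) →
      ps.foldl (fun l p => l.eraseIdx p) xs = pvKeep ps 0 xs := by
  induction ps with
  | nil => intro xs _; exact (pvKeep_all_lt [] xs 0 (by simp)).symm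
  | cons p ps' ih =>
    intro xs hp
    rcases List.pairwise_cons.1 hp with ⟨h1, h2⟩
    have := ih (xs.eraseIdx p) h2
    calc (p :: ps').foldl (fun l p => l.eraseIdx p) xs
        = ps'.foldl (fun l p => l.eraseIdx p) (xs.eraseIdx p) := rfl
      _ = pvKeep ps' 0 (xs.eraseIdx p) := this
      _ = pvKeep ((0 + p) :: ps') 0 xs := pvKeep_eraseIdx ps' xs 0 p (fun q hq => by have := h1 q hq; omega)
      _ = pvKeep (p :: ps') 0 xs := by rw [Nat.zero_add]

theorem pvA_eq (xs : List Int) :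
    remove_hamming_bits_py xs = pvKeep (pvPosList xs.length 0) 0 xs := by
  show List.foldl (fun l p => l.eraseIdx p) xs (pvBuildPos xs.length 0 []) = _
  rw [pvBuildPos_eq, List.append_nil]
  exact pvFoldl_eraseIdx _ xs (pvPosList_pairwise _ _)

-- the B-side fold, with its loop invariant: p is the least power of two above i
theorem pvB_fold (n : Int) (S : List Nat)
    (hS : ∀ q : Nat, q ∈ S ↔ (∃ j, q + 1 = 2 ^ j) ∧ (q : Int) + 1 < n) :
    ∀ (t : List Int) (i p : Nat) (out : List Int),
      (∃ k, p = 2 ^ k) → i < p → p ≤ 2 * i + 1 →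
      (List.foldl
        (fun (st : Int × List Int) (ix : Int × Int) =>
          if ix.1 + 1 == st.1 then
            (st.1 * 2, if ix.1 + 1 < n then st.2 else st.2 ++ [ix.2])
          else
            (st.1, st.2 ++ [ix.2]))
        ((p : Int), out) (PySem.List.enumerate t (i : Int))).2 = out ++ pvKeep S i t := by
  intro t
  induction t with
  | nil => intro i p out _ _ _; simp [PySem.List.enumerate_nil, pvKeep]
  | cons x r ih =>
    intro i p out hpow hlt hle
    rcases hpow with ⟨k, rfl⟩
    rw [PySem.List.enumerate_cons, List.foldl_cons]
    by_cases heq : i + 1 = 2 ^ k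
    · have hbeq : ((i : Int) + 1 == ((2 ^ k : Nat) : Int)) = true := by
        simp only [beq_iff_eq]
        have h' : ((i : Int) + 1) = ((i + 1 : Nat) : Int) := by push_cast; ring
        rw [h']
        exact_mod_cast heq
      rw [if_pos hbeq]
      have hiS : i ∈ S ↔ ((i : Int) + 1 < n) := by
        rw [hS]; exact ⟨fun h => h.2, fun h => ⟨⟨k, heq⟩, h⟩⟩
      have hstep : (((2 ^ k : Nat) : Int) * 2, if ((i : Int) + 1 < n) then out else out ++ [x])
          = (((2 ^ (k + 1) : Nat) : Int), if ((i : Int) + 1 < n) then out else out ++ [x]) := by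
        push_cast; ring_nf
      have hinv1 : i + 1 < 2 ^ (k + 1) := by
        have : 1 ≤ 2 ^ k := Nat.one_le_two_pow
        have : 2 ^ (k + 1) = 2 * 2 ^ k := by ring
        omega
      have hinv2 : 2 ^ (k + 1) ≤ 2 * (i + 1) + 1 := by
        have : 2 ^ (k + 1) = 2 * 2 ^ k := by ring
        omega
      by_cases hn : (i : Int) + 1 < n
      · rw [if_pos hn] at hstep ⊢
        rw [hstep]
        have hcast : ((i : Int) + 1) = ((i + 1 : Nat) : Int) := by push_cast; ring
        rw [hcast, ih (i + 1) (2 ^ (k + 1)) out ⟨k + 1, rfl⟩ hinv1 hinv2]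
        rw [pvKeep, if_pos (hiS.2 hn)]
      · rw [if_neg hn] at hstep ⊢
        rw [hstep]
        have hcast : ((i : Int) + 1) = ((i + 1 : Nat) : Int) := by push_cast; ring
        rw [hcast, ih (i + 1) (2 ^ (k + 1)) (out ++ [x]) ⟨k + 1, rfl⟩ hinv1 hinv2]
        rw [pvKeep, if_neg (fun hm => hn (hiS.1 hm)), List.append_assoc]
        rfl
    · have hbeq : ((i : Int) + 1 == ((2 ^ k : Nat) : Int)) = false := by
        simp only [beq_eq_false_iff_ne, ne_eq]
        intro hc
        apply heq
        have : ((i : Int) + 1) = ((i + 1 : Nat) : Int) := by push_cast; ring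
        rw [this] at hc
        exact_mod_cast hc
      rw [if_neg (by rw [hbeq]; exact Bool.false_ne_true)]
      have hiS : i ∉ S := by
        rw [hS]
        rintro ⟨⟨j, hj⟩, _⟩
        -- i + 1 = 2 ^ j together with i < 2 ^ k ≤ 2 i + 1 forces 2 ^ k = i + 1
        have hj1 : 2 ^ j ≤ 2 ^ k := by omega
        have hj2 : 2 ^ k < 2 ^ (j + 1) := by
          have : 2 ^ (j + 1) = 2 * 2 ^ j := by ring
          omega
        have hjk : j ≤ k := (Nat.pow_le_pow_iff_right (by norm_num)).1 hj1
        have hkj : k < j + 1 := (Nat.pow_lt_pow_iff_right (by norm_num)).1 hj2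
        have hjk' : j = k := by omega
        rw [hjk'] at hj
        exact heq hj
      have hcast : ((i : Int) + 1) = ((i + 1 : Nat) : Int) := by push_cast; ring
      rw [hcast, ih (i + 1) (2 ^ k) (out ++ [x]) ⟨k, rfl⟩ (by omega) (by omega)]
      rw [pvKeep, if_neg hiS, List.append_assoc]
      rfl

theorem pvB_eq (xs : List Int) :
    remove_hamming_bits_py_alt xs = pvKeep (pvPosList xs.length 0) 0 xs := by
  show (List.foldl
    (fun (st : Int × List Int) (ix : Int × Int) =>
      if ix.1 + 1 == st.1 then
        (st.1 * 2, if ix.1 + 1 < (xs.length : Int) then st.2 else st.2 ++ [ix.2])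
      else
        (st.1, st.2 ++ [ix.2]))
    (1, []) (PySem.List.enumerate xs 0)).2 = _
  have hS : ∀ q : Nat, q ∈ pvPosList xs.length 0 ↔
      (∃ j, q + 1 = 2 ^ j) ∧ (q : Int) + 1 < (xs.length : Int) := by
    intro q
    rw [pvPosList_mem]
    constructor
    · rintro ⟨j, _, hj2, rfl⟩
      have h1 : 1 ≤ 2 ^ j := Nat.one_le_two_pow
      exact ⟨⟨j, by omega⟩, by omega⟩
    · rintro ⟨⟨j, hj⟩, hn⟩
      refine ⟨j, by omega, ?_, by omega⟩
      have : q + 1 < xs.length := by exact_mod_cast (by omega : (q : Int) + 1 < (xs.length : Int))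
      omega
  have := pvB_fold (xs.length : Int) (pvPosList xs.length 0) hS xs 0 1 [] ⟨0, rfl⟩ (by omega) (by omega)
  simpa using this

-- ===== VERDICT (by name: the statement is the Claim_ definition above) =====
theorem remove_hamming_bits_py_spec : Claim_equal_remove_hamming_bits_py := by
  intro xs _
  unfold Spec_remove_hamming_bits_py
  rw [pvA_eq, pvB_eq]
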